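-- pv_equiv track=rewrite | github.com/pypi-data/pypi-mirror-48 | packages/pycola/pycola-0.1.59.tar.gz/pycola-0.1.59/pycola/bulletin_parser.py | deep_major
-- ===== SOURCE A (Python) =====
-- def deep_major(txt):
--     """ function to dig deeper into requirement text and obtain if any
--         major related entity is missed from the first step """
--
--     major = ""
--     for line in txt:
--         if "university in " not in line.lower():
--             continue
--         if "in order" in line.lower():
--             continue
--         if "degree" in line.lower():
--             major = line.split(" in ")[1].split("related")[0]
--     return major
-- ===== SOURCE B (Python) =====
-- def deep_major(txt):
--     for line in reversed(list(txt)):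
--         low = line.lower()
--         if "university in " in low and "in order" not in low and "degree" in low:
--             return line.split(" in ")[1].split("related")[0]
--     return ""
-- ===== Notes on version B (the rewrite author's own statement) =====
-- stated objective: simpler
-- what changed: Replaces A's full forward scan with a last-wins accumulator by a reversed scan that returns the extracted major at the first matching line from the end (early exit).
import Mathlib
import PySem

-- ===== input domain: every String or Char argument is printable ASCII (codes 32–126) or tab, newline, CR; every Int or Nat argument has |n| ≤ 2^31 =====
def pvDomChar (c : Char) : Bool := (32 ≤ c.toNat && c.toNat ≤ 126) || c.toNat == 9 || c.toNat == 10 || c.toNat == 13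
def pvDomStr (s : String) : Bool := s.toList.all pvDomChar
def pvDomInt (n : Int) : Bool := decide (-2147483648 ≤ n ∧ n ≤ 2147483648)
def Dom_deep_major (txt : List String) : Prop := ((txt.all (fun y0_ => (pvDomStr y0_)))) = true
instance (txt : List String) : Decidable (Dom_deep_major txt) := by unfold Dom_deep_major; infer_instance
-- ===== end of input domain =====

-- B replaces A's forward scan with a last-wins accumulator by a reversed scan
-- that returns at the first matching line from the end (simpler, early exit).

-- ===== PORT A =====
-- forward fold over txt carrying the accumulator `major`, branches in A's order.
-- line.split(" in ")[1]: Python raises IndexError when index 1 is missing (pyGet? = none);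
-- such inputs are excluded by Pre_deep_major, the port returns "" there.
def deep_major (txt : List String) : String :=
  txt.foldl
    (fun major line =>
      if !(PySem.Str.isIn "university in " (PySem.Str.lower line)) then major
      else if PySem.Str.isIn "in order" (PySem.Str.lower line) then major
      else if PySem.Str.isIn "degree" (PySem.Str.lower line) then
        match PySem.List.pyGet? ((PySem.Str.split? line " in ").getD []) 1 with
        | some s => ((PySem.Str.split? s "related").getD []).headD ""
        | none => ""   -- Python: IndexError; outside Pre_deep_major
      else major)
    ""

-- ===== PORT B =====
-- first-match scan (early exit) over the reversed list.
def deep_major_alt_go : List String → String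
  | [] => ""
  | line :: rest =>
    let low := PySem.Str.lower line
    if PySem.Str.isIn "university in " low
        && !(PySem.Str.isIn "in order" low)
        && PySem.Str.isIn "degree" low then
      match PySem.List.pyGet? ((PySem.Str.split? line " in ").getD []) 1 with
      | some s => ((PySem.Str.split? s "related").getD []).headD ""
      | none => ""   -- Python: IndexError; outside Pre_deep_major
    else deep_major_alt_go rest

def deep_major_alt (txt : List String) : String :=
  deep_major_alt_go txt.reverse

-- ===== PRECONDITION & SPEC =====
-- Pre_ excludes exactly the inputs on which Python A raises IndexError: a line that
-- passes all three (case-insensitive) tests but contains no case-sensitive " in ",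
-- so line.split(" in ")[1] is out of range (e.g. ["University In Weird degree"]).
def Pre_deep_major (txt : List String) : Prop :=
  ∀ line ∈ txt,
    (PySem.Str.isIn "university in " (PySem.Str.lower line) = true ∧
     PySem.Str.isIn "in order" (PySem.Str.lower line) = false ∧
     PySem.Str.isIn "degree" (PySem.Str.lower line) = true) →
    PySem.Str.isIn " in " line = true
instance (txt : List String) : Decidable (Pre_deep_major txt) := by unfold Pre_deep_major; infer_instance
def pvWitness_deep_major : List String := ["a university in Physics related field degree"]

def Spec_deep_major (txt : List String) (out : String) : Prop := out = deep_major_alt txt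
instance (txt : List String) (out : String) : Decidable (Spec_deep_major txt out) := by unfold Spec_deep_major; infer_instance

-- ===== CLAIM (what is proved, stated in full; the proofs are below) =====
def Claim_equal_deep_major : Prop := ∀ (txt : List String), Dom_deep_major txt → Pre_deep_major txt → Spec_deep_major txt (deep_major txt)

-- ===== LEMMAS AND PROOFS =====

def pvQual (line : String) : Bool :=
  PySem.Str.isIn "university in " (PySem.Str.lower line)
    && !(PySem.Str.isIn "in order" (PySem.Str.lower line))
    && PySem.Str.isIn "degree" (PySem.Str.lower line)

def pvExt (line : String) : String :=
  match PySem.List.pyGet? ((PySem.Str.split? line " in ").getD []) 1 with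
  | some s => ((PySem.Str.split? s "related").getD []).headD ""
  | none => ""

theorem go_eq (xs : List String) :
    deep_major_alt_go xs =
      match xs with
      | [] => ""
      | line :: rest => if pvQual line then pvExt line else deep_major_alt_go rest := by
  cases xs with
  | nil => rfl
  | cons l t =>
    simp only [deep_major_alt_go, pvQual, pvExt]

theorem go_append (xs ys : List String) :
    deep_major_alt_go (xs ++ ys) =
      if xs.any pvQual then deep_major_alt_go xs else deep_major_alt_go ys := by
  induction xs with
  | nil => simp
  | cons l t ih =>
    simp only [List.cons_append, go_eq (l :: (t ++ ys)), go_eq (l :: t), List.any_cons]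
    by_cases h : pvQual l = true
    · simp [h]
    · simp [h, ih]

theorem go_of_no_qual (xs : List String) (h : xs.any pvQual = false) :
    deep_major_alt_go xs = "" := by
  induction xs with
  | nil => rfl
  | cons l t ih =>
    simp only [List.any_cons, Bool.or_eq_false_iff] at h
    rw [go_eq]
    simp [h.1, ih h.2]

theorem step_eq (major line : String) :
    (if (!PySem.Str.isIn "university in " (PySem.Str.lower line)) = true then major
     else if PySem.Str.isIn "in order" (PySem.Str.lower line) = true then major
     else if PySem.Str.isIn "degree" (PySem.Str.lower line) = true then
       match PySem.List.pyGet? ((PySem.Str.split? line " in ").getD []) 1 with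
       | some s => ((PySem.Str.split? s "related").getD []).headD ""
       | none => ""
     else major)
    = if pvQual line then pvExt line else major := by
  simp only [pvQual, pvExt]
  cases h1 : PySem.Str.isIn "university in " (PySem.Str.lower line) <;>
    cases h2 : PySem.Str.isIn "in order" (PySem.Str.lower line) <;>
      cases h3 : PySem.Str.isIn "degree" (PySem.Str.lower line) <;>
        simp [h1, h2, h3]

theorem foldl_eq_go (txt : List String) (init : String) :
    txt.foldl
      (fun major line =>
        if !(PySem.Str.isIn "university in " (PySem.Str.lower line)) then major
        else if PySem.Str.isIn "in order" (PySem.Str.lower line) then major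
        else if PySem.Str.isIn "degree" (PySem.Str.lower line) then
          match PySem.List.pyGet? ((PySem.Str.split? line " in ").getD []) 1 with
          | some s => ((PySem.Str.split? s "related").getD []).headD ""
          | none => ""
        else major) init
    = if txt.any pvQual then deep_major_alt_go txt.reverse else init := by
  induction txt generalizing init with
  | nil => simp
  | cons l t ih =>
    simp only [List.foldl_cons, List.reverse_cons, List.any_cons]
    rw [ih, step_eq, go_append]
    by_cases ht : t.any pvQual = true
    · simp [ht, List.any_reverse]
    · have ht' : t.reverse.any pvQual = false := by
        rw [List.any_reverse]; exact eq_false_of_ne_true ht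
      simp only [ht', if_false, eq_false_of_ne_true ht, Bool.or_false, Bool.false_or,
        if_neg (fun hh => ht hh)]
      by_cases hl : pvQual l = true
      · simp [hl, go_eq]
      · simp [hl]

-- ===== VERDICT (by name: the statement is the Claim_ definition above) =====
theorem deep_major_spec : Claim_equal_deep_major := by
  intro txt _ _
  unfold Spec_deep_major deep_major deep_major_alt
  rw [foldl_eq_go]
  by_cases h : txt.any pvQual = true
  · simp [h]
  · have h' : txt.reverse.any pvQual = false := by
      rw [List.any_reverse]; exact eq_false_of_ne_true h
    simp [h, go_of_no_qual _ h']
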